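-- pv_equiv track=rewrite | github.com/SCHOUTER/TU | eiki/Bonus3/python_files/bonus_exercise_3.py | markov_blanket
-- ===== SOURCE A (Python) =====
-- def markov_blanket(bayes_net, var):
--     '''
--     Returns the Markov blanket of var as a set of variable names.
--     bayes_net: dict[var] = {"parents": [...], "cpt": {...}}
--     '''
--     # TODO: compute parents(var), children(var), and parents of children(var)
--     parents = set(bayes_net[var]["parents"])
--     children = set()
--     for node, data in bayes_net.items():
--         if var in data["parents"]:
--             children.add(node)
--
--     parents_of_children = set()
--     for child in children:
--         parents_of_children.update(bayes_net[child]["parents"])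
--
--     # TODO: return a set excluding var itself
--     blanket = parents | children | parents_of_children
--     blanket.discard(var)
--     return blanket
-- ===== SOURCE B (Python) =====
-- def markov_blanket(bayes_net, var):
--     # Different data structure: build a reverse (parent -> set of children) index
--     # in one pass, then the children of var are a direct lookup instead of A's
--     # membership scan 'var in data["parents"]' over every node.
--     rev = {}
--     for node, data in bayes_net.items():
--         for p in data["parents"]:
--             rev.setdefault(p, set()).add(node)
--     children = rev.get(var, set())
--     blanket = set(bayes_net[var]["parents"]) | children
--     for c in children:
--         blanket.update(bayes_net[c]["parents"])
--     blanket.discard(var)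
--     return blanket
-- ===== Notes on version B (the rewrite author's own statement) =====
-- stated objective: alternative
-- what changed: B builds a reverse parent-to-children index (dict of sets) in a single pass and obtains the children of var by one dictionary lookup, replacing A's per-node membership scan 'var in data["parents"]' and its separate children-accumulation pass.
import Mathlib
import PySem

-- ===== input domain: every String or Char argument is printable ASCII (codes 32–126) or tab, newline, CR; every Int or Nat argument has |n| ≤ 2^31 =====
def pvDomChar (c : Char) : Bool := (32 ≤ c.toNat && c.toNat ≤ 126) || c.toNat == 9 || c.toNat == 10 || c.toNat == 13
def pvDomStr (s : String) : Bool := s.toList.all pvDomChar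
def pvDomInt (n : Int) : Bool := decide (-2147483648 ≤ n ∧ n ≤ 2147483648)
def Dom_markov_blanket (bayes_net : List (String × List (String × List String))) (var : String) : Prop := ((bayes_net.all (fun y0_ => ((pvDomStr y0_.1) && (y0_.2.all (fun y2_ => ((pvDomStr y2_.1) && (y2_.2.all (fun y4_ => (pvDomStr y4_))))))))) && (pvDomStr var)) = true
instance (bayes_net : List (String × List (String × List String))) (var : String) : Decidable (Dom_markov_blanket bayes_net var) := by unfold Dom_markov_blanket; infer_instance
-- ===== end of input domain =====

-- B builds a reverse parent->children index (dict of sets) in one pass and looks var's children up,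
-- instead of A's membership scan over every node's parent list; alternative data structure, same cost.


-- ===== PORT A =====
-- bayes_net[x]["parents"] ported via Dict.getD (total form); Pre_ guarantees the keys exist, matching Python's KeyError-free runs.
def markov_blanket (bayes_net : List (String × List (String × List String))) (var : String) : List String :=
  let parents : PySem.Set String :=
    PySem.Set.ofList (PySem.Dict.getD (PySem.Dict.mk (PySem.Dict.getD (PySem.Dict.mk bayes_net) var [])) "parents" [])
  let children : PySem.Set String :=
    bayes_net.foldl (fun s nd =>
      if (PySem.Dict.getD (PySem.Dict.mk nd.2) "parents" []).contains var then PySem.Set.add s nd.1 else s)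
      PySem.Set.empty
  let parents_of_children : PySem.Set String :=
    children.foldl (fun s c =>
      PySem.Set.update s (PySem.Dict.getD (PySem.Dict.mk (PySem.Dict.getD (PySem.Dict.mk bayes_net) c [])) "parents" []))
      PySem.Set.empty
  let blanket := PySem.Set.union (PySem.Set.union parents children) parents_of_children
  PySem.Set.discard blanket var

-- ===== PORT B =====
-- rev.setdefault(p, set()).add(node) mutates the set stored under p in place: ported as Dict.modify p empty (Set.add · node).
def markov_blanket_alt (bayes_net : List (String × List (String × List String))) (var : String) : List String :=
  let rev : PySem.Dict String (PySem.Set String) :=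
    bayes_net.foldl (fun rev nd =>
      (PySem.Dict.getD (PySem.Dict.mk nd.2) "parents" []).foldl
        (fun rev p => PySem.Dict.modify rev p PySem.Set.empty (fun s => PySem.Set.add s nd.1)) rev)
      PySem.Dict.empty
  let children : PySem.Set String := PySem.Dict.getD rev var PySem.Set.empty
  let blanket : PySem.Set String :=
    PySem.Set.union (PySem.Set.ofList (PySem.Dict.getD (PySem.Dict.mk (PySem.Dict.getD (PySem.Dict.mk bayes_net) var [])) "parents" [])) children
  let blanket := children.foldl (fun s c =>
      PySem.Set.update s (PySem.Dict.getD (PySem.Dict.mk (PySem.Dict.getD (PySem.Dict.mk bayes_net) c [])) "parents" [])) blanket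
  PySem.Set.discard blanket var

-- ===== PRECONDITION & SPEC =====
-- Pre_ requires: var is a key and every node's dict has a "parents" key (otherwise Python A raises KeyError),
-- and the association lists have no duplicate keys — a duplicate-key list does not encode a Python dict input,
-- so nothing Python A returns on is excluded by the nodup clauses.
def Pre_markov_blanket (bayes_net : List (String × List (String × List String))) (var : String) : Prop :=
  (bayes_net.map Prod.fst).Nodup ∧ var ∈ bayes_net.map Prod.fst ∧
    ∀ p ∈ bayes_net, (p.2.map Prod.fst).Nodup ∧ "parents" ∈ p.2.map Prod.fst
instance (bayes_net : List (String × List (String × List String))) (var : String) : Decidable (Pre_markov_blanket bayes_net var) := by unfold Pre_markov_blanket; infer_instance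

def pvWitness_markov_blanket : (List (String × List (String × List String))) × String :=
  ([("A", [("parents", [])]), ("B", [("parents", ["A"])]), ("C", [("parents", ["A", "B"])])], "B")

def Spec_markov_blanket (bayes_net : List (String × List (String × List String))) (var : String) (out : List String) : Prop := out = markov_blanket_alt bayes_net var
instance (bayes_net : List (String × List (String × List String))) (var : String) (out : List String) : Decidable (Spec_markov_blanket bayes_net var out) := by unfold Spec_markov_blanket; infer_instance

-- ===== CLAIM (what is proved, stated in full; the proofs are below) =====
def Claim_equal_markov_blanket : Prop := ∀ (bayes_net : List (String × List (String × List String))) (var : String), Dom_markov_blanket bayes_net var → Pre_markov_blanket bayes_net var → Spec_markov_blanket bayes_net var (markov_blanket bayes_net var)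

-- ===== LEMMAS AND PROOFS =====

-- Abbreviations used only by the proofs (the ports' subterms).
def pvG (bayes_net : List (String × List (String × List String))) (c : String) : List String :=
  PySem.Dict.getD (PySem.Dict.mk (PySem.Dict.getD (PySem.Dict.mk bayes_net) c [])) "parents" []

def pvPar (nd : String × List (String × List String)) : List String :=
  PySem.Dict.getD (PySem.Dict.mk nd.2) "parents" []

-- B's inner index loop: the set stored under v gains nd.1 exactly when v occurs among the parents.
theorem pv_inner_getD (c v : String) :
    ∀ (ps : List String) (d : PySem.Dict String (PySem.Set String)),
      (ps.foldl (fun d p => PySem.Dict.modify d p PySem.Set.empty (fun s => PySem.Set.add s c)) d).getD v PySem.Set.empty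
        = if v ∈ ps then PySem.Set.add (d.getD v PySem.Set.empty) c else d.getD v PySem.Set.empty := by
  intro ps
  induction ps with
  | nil => intro d; simp
  | cons p ps ih =>
    intro d
    rw [List.foldl_cons, ih]
    by_cases hvp : v = p
    · subst hvp
      simp [PySem.Dict.getD_modify_self, PySem.Set.add_of_mem, PySem.Set.mem_add]
    · simp [PySem.Dict.getD_modify, hvp]

-- B's index build, looked up at var, is exactly A's children loop.
theorem pv_rev_getD (var : String) :
    ∀ (l : List (String × List (String × List String))) (d : PySem.Dict String (PySem.Set String)),
      (l.foldl (fun rev nd => (pvPar nd).foldl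
          (fun rev p => PySem.Dict.modify rev p PySem.Set.empty (fun s => PySem.Set.add s nd.1)) rev) d).getD var PySem.Set.empty
        = l.foldl (fun s nd => if (pvPar nd).contains var then PySem.Set.add s nd.1 else s) (d.getD var PySem.Set.empty) := by
  intro l
  induction l with
  | nil => intro d; rfl
  | cons nd l ih =>
    intro d
    rw [List.foldl_cons, ih, List.foldl_cons, pv_inner_getD]
    by_cases h : var ∈ pvPar nd
    · simp [h]
    · simp [h]

-- A loop 'for c in cs: s.update(g c)' is one update with the flattened lists.
theorem foldl_update_eq_update_flatMap {α β : Type} [BEq α] (g : β → List α) :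
    ∀ (l : List β) (s : PySem.Set α),
      l.foldl (fun s c => PySem.Set.update s (g c)) s = PySem.Set.update s (l.flatMap g) := by
  intro l
  induction l with
  | nil => intro s; simp [PySem.Set.update]
  | cons c l ih =>
    intro s
    rw [List.foldl_cons, ih, List.flatMap_cons]
    simp [PySem.Set.update, List.foldl_append]

-- Updating with a deduplicated list adds the same elements.
theorem update_ofList_eq_update {α : Type} [BEq α] [LawfulBEq α] (s : PySem.Set α) (xs : List α) :
    PySem.Set.update s (PySem.Set.ofList xs) = PySem.Set.update s xs := by
  rw [PySem.Set.update_eq_append_filter, PySem.Set.update_eq_append_filter, PySem.Set.ofList_ofList]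

-- ===== VERDICT (by name: the statement is the Claim_ definition above) =====
theorem markov_blanket_spec : Claim_equal_markov_blanket := by
  intro bayes_net var _hDom _hPre
  show PySem.Set.discard
      (PySem.Set.union
        (PySem.Set.union (PySem.Set.ofList (pvG bayes_net var))
          (bayes_net.foldl (fun s nd => if (pvPar nd).contains var then PySem.Set.add s nd.1 else s) PySem.Set.empty))
        ((bayes_net.foldl (fun s nd => if (pvPar nd).contains var then PySem.Set.add s nd.1 else s) PySem.Set.empty).foldl
          (fun s c => PySem.Set.update s (pvG bayes_net c)) PySem.Set.empty)) var
    = PySem.Set.discard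
        (((bayes_net.foldl (fun rev nd => (pvPar nd).foldl
              (fun rev p => PySem.Dict.modify rev p PySem.Set.empty (fun s => PySem.Set.add s nd.1)) rev)
            PySem.Dict.empty).getD var PySem.Set.empty).foldl
          (fun s c => PySem.Set.update s (pvG bayes_net c))
          (PySem.Set.union (PySem.Set.ofList (pvG bayes_net var))
            ((bayes_net.foldl (fun rev nd => (pvPar nd).foldl
                (fun rev p => PySem.Dict.modify rev p PySem.Set.empty (fun s => PySem.Set.add s nd.1)) rev)
              PySem.Dict.empty).getD var PySem.Set.empty))) var
  rw [pv_rev_getD, PySem.Dict.getD_empty]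
  rw [foldl_update_eq_update_flatMap, foldl_update_eq_update_flatMap]
  set C := bayes_net.foldl (fun s nd => if (pvPar nd).contains var then PySem.Set.add s nd.1 else s) PySem.Set.empty with hC
  show PySem.Set.discard (PySem.Set.union (PySem.Set.union (PySem.Set.ofList (pvG bayes_net var)) C)
      (PySem.Set.update PySem.Set.empty (C.flatMap (pvG bayes_net)))) var = _
  rw [PySem.Set.update_empty]
  show PySem.Set.discard (PySem.Set.update (PySem.Set.update (PySem.Set.ofList (pvG bayes_net var)) C)
      (PySem.Set.ofList (C.flatMap (pvG bayes_net)))) var = _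
  rw [update_ofList_eq_update]
  rfl
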